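-- pv_equiv track=rewrite | github.com/JackZeng0208/DynaSD | main/hetero_multi_candidate/speculative_decoding_with_tree.py | tree_prob_repeat
-- ===== SOURCE A (Python) =====
-- def tree_prob_repeat(tree_config = None):
--     prob_repeat = []
--     branch_in_prev_level = 1
--     for level in tree_config:
--         for _ in range(branch_in_prev_level):
--             prob_repeat.append(level)
--         branch_in_prev_level *= level
--     return prob_repeat
-- ===== SOURCE B (Python) =====
-- def tree_prob_repeat(tree_config=None):
--     # Divide and conquer on the list structure, maintaining no branch product:
--     # the head level appears once, and every element of the recursive result
--     # for the tail is repeated head times (which implicitly multiplies every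
--     # deeper level's repeat count by head, i.e. yields the prefix products).
--     if not tree_config:
--         return []
--     head = tree_config[0]
--     return [head] + [x for v in tree_prob_repeat(tree_config[1:]) for x in [v] * head]
-- ===== Notes on version B (the rewrite author's own statement) =====
-- stated objective: alternative
-- what changed: A runs one loop maintaining a running branch product and emitting each level that many times; B maintains no product at all: it recurses on the list structure, emitting the head once and repeating each element of the tail's recursive result head times (the prefix products arise implicitly from nested repetition).
-- outside the precondition, e.g. on tree_prob_repeat([-1, -1, 5]): A returns [-1, 5], B returns [-1]
import Mathlib
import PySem

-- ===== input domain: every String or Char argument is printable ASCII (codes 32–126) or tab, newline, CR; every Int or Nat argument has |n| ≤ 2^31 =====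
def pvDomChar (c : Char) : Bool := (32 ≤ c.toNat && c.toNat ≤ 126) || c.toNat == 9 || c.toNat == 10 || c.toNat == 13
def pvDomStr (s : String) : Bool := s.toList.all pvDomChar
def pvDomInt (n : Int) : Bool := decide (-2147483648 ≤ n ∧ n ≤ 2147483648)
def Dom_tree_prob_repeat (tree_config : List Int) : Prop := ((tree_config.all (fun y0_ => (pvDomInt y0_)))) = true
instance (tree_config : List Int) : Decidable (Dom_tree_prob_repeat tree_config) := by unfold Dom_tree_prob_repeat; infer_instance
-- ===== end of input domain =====

-- B replaces A's running-product loop by a structural recursion with no product (head once, tail result repeated head times); objective: alternative. Pre_ restricts to the natural domain of nonnegative branch counts.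


-- ===== PORT A =====
-- for _ in range(b): append(level) — range(b) is empty for b ≤ 0, matched by Int.toNat
def tree_prob_repeat (tree_config : List Int) : List Int :=
  (tree_config.foldl
    (fun (s : List Int × Int) level =>
      (s.1 ++ List.replicate s.2.toNat level, s.2 * level))
    ([], 1)).1

-- ===== PORT B =====
-- [head] + [x for v in f(rest) for x in [v]*head] — [v]*head is empty for head ≤ 0 (Int.toNat)
def tree_prob_repeat_alt (tree_config : List Int) : List Int :=
  match tree_config with
  | [] => []
  | head :: rest =>
      head :: (tree_prob_repeat_alt rest).flatMap (fun v => List.replicate head.toNat v)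

-- ===== PRECONDITION & SPEC =====
-- Pre_ restricts to the task's natural domain: branch counts are nonnegative. On configs
-- where negative counts make a prefix product turn positive again, A still returns a value
-- that B does not match (see claim cites).
def Pre_tree_prob_repeat (tree_config : List Int) : Prop := ∀ x ∈ tree_config, 0 ≤ x
instance (tree_config : List Int) : Decidable (Pre_tree_prob_repeat tree_config) := by unfold Pre_tree_prob_repeat; infer_instance
def pvWitness_tree_prob_repeat : List Int := [2, 3, 1]

def Spec_tree_prob_repeat (tree_config : List Int) (out : List Int) : Prop := out = tree_prob_repeat_alt tree_config
instance (tree_config : List Int) (out : List Int) : Decidable (Spec_tree_prob_repeat tree_config out) := by unfold Spec_tree_prob_repeat; infer_instance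

-- ===== CLAIM (what is proved, stated in full; the proofs are below) =====
def Claim_equal_tree_prob_repeat : Prop := ∀ (tree_config : List Int), Dom_tree_prob_repeat tree_config → Pre_tree_prob_repeat tree_config → Spec_tree_prob_repeat tree_config (tree_prob_repeat tree_config)

-- ===== LEMMAS AND PROOFS =====
theorem pv_replicate_flatMap (a b : Nat) (v : Int) :
    (List.replicate b v).flatMap (fun w => List.replicate a w) = List.replicate (b * a) v := by
  induction b with
  | zero => simp
  | succ n ih =>
      rw [List.replicate_succ, List.flatMap_cons, ih, Nat.succ_mul, Nat.add_comm,
        List.replicate_add]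

theorem pv_flatMap_flatMap (xs : List Int) (a b : Nat) :
    (xs.flatMap (fun v => List.replicate b v)).flatMap (fun v => List.replicate a v)
      = xs.flatMap (fun v => List.replicate (b * a) v) := by
  induction xs with
  | nil => simp
  | cons x rest ih => simp [List.flatMap_cons, ih, pv_replicate_flatMap]

theorem pv_toNat_mul (p l : Int) (hp : 0 ≤ p) (hl : 0 ≤ l) :
    (p * l).toNat = l.toNat * p.toNat := by
  have : ((p * l).toNat : Int) = ((l.toNat * p.toNat : Nat) : Int) := by
    push_cast
    rw [Int.toNat_of_nonneg (mul_nonneg hp hl), Int.toNat_of_nonneg hp, Int.toNat_of_nonneg hl]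
    ring
  exact_mod_cast this

theorem pv_fold_eq (tree_config : List Int) (h : ∀ x ∈ tree_config, 0 ≤ x) :
    ∀ (acc : List Int) (p : Int), 0 ≤ p →
      (tree_config.foldl
        (fun (s : List Int × Int) level =>
          (s.1 ++ List.replicate s.2.toNat level, s.2 * level))
        (acc, p)).1
      = acc ++ (tree_prob_repeat_alt tree_config).flatMap (fun v => List.replicate p.toNat v) := by
  induction tree_config with
  | nil => intro acc p _; simp [tree_prob_repeat_alt]
  | cons level rest ih =>
      intro acc p hp
      have hl : 0 ≤ level := h level (List.mem_cons_self ..)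
      have hrest : ∀ x ∈ rest, 0 ≤ x := fun x hx => h x (List.mem_cons_of_mem _ hx)
      simp only [List.foldl_cons]
      rw [ih hrest _ (p * level) (mul_nonneg hp hl)]
      simp only [tree_prob_repeat_alt, List.flatMap_cons, pv_flatMap_flatMap,
        pv_toNat_mul p level hp hl, List.append_assoc]

-- ===== VERDICT (by name: the statement is the Claim_ definition above) =====
theorem tree_prob_repeat_spec : Claim_equal_tree_prob_repeat := by
  intro tc _ hpre
  unfold Spec_tree_prob_repeat tree_prob_repeat
  rw [pv_fold_eq tc hpre [] 1 (by norm_num)]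
  simp
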